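-- pv_equiv track=rewrite | github.com/rowak/webattendant | backend/api.py | create_course_sort
-- ===== SOURCE A (Python) =====
-- def create_course_sort(sec_list):
--     '''
--     A function that will return a dictionary where every key will be a course
--     code and every value will be an array of all the courses that share the code
--     in a format similar to what we return.
--     '''
--     new_list = {}
--     for sec in sec_list:
--         code = sec['code'].upper().replace("*", "")
--         if code not in new_list:
--             new_list[code] = []
--
--         new_list[code].append(sec)
--
--     return new_list
-- ===== SOURCE B (Python) =====
-- def create_course_sort(sec_list):
--     codes = list(dict.fromkeys(
--         sec['code'].upper().replace("*", "") for sec in sec_list))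
--     return {c: [sec for sec in sec_list
--                 if sec['code'].upper().replace("*", "") == c]
--             for c in codes}
-- ===== Notes on version B (the rewrite author's own statement) =====
-- stated objective: alternative
-- what changed: Replaces the incremental dict-building loop by a two-pass decomposition: first dedupe the normalized codes in first-occurrence order, then build each group with a filter comprehension over the whole list.
import Mathlib
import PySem

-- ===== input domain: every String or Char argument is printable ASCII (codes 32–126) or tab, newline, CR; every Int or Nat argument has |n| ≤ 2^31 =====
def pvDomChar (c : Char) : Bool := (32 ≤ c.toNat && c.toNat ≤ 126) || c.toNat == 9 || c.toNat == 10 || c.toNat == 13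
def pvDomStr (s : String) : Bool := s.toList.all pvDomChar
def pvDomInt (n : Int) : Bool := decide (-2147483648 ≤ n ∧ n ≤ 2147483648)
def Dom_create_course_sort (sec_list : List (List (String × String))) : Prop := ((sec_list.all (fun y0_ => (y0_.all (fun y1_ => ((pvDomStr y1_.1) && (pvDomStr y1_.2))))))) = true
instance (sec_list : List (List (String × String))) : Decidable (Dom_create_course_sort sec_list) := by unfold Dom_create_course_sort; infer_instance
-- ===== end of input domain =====

-- B groups the sections in two passes (dedup of the normalized codes, then one filter per code)
-- instead of A's incremental dict building; same value, not faster (alternative decomposition).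

-- shared helper: sec['code'].upper().replace("*", "") (getD "" is only reached outside Pre_)
def normCode (sec : List (String × String)) : String :=
  PySem.Str.replace (PySem.Str.upper ((PySem.Dict.mk sec).getD "code" "")) "*" ""

-- ===== PORT A =====
def create_course_sort (sec_list : List (List (String × String))) : List (String × List (List (String × String))) :=
  (sec_list.foldl (fun new_list sec =>
      let code := normCode sec
      let new_list := if new_list.contains code then new_list else new_list.insert code []
      new_list.modify code [] (fun l => l ++ [sec]))
    PySem.Dict.empty).items

-- ===== PORT B =====
def create_course_sort_alt (sec_list : List (List (String × String))) : List (String × List (List (String × String))) :=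
  let codes := PySem.List.dedup (sec_list.map normCode)
  codes.map (fun c => (c, sec_list.filter (fun sec => normCode sec == c)))

-- ===== PRECONDITION & SPEC =====
-- Pre_ excludes exactly the sections without a 'code' key, on which Python A raises KeyError.
def Pre_create_course_sort (sec_list : List (List (String × String))) : Prop :=
  ∀ sec ∈ sec_list, (PySem.Dict.mk sec).contains "code" = true
instance (sec_list : List (List (String × String))) : Decidable (Pre_create_course_sort sec_list) := by unfold Pre_create_course_sort; infer_instance

def pvWitness_create_course_sort : (List (List (String × String))) :=
  [[("code", "cis*1500")], [("code", "CIS*1500"), ("name", "intro")], [("code", "MATH*1080")]]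

def Spec_create_course_sort (sec_list : List (List (String × String))) (out : List (String × List (List (String × String)))) : Prop := out = create_course_sort_alt sec_list
instance (sec_list : List (List (String × String))) (out : List (String × List (List (String × String)))) : Decidable (Spec_create_course_sort sec_list out) := by unfold Spec_create_course_sort; infer_instance

-- ===== CLAIM (what is proved, stated in full; the proofs are below) =====
def Claim_equal_create_course_sort : Prop := ∀ (sec_list : List (List (String × String))), Dom_create_course_sort sec_list → Pre_create_course_sort sec_list → Spec_create_course_sort sec_list (create_course_sort sec_list)

-- ===== LEMMAS AND PROOFS =====

-- the common shape of both results: the distinct normalized codes (first occurrence order),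
-- each paired with the sections carrying it, in list order
def groupSpec (ys : List (List (String × String))) : List (String × List (List (String × String))) :=
  (PySem.Set.ofList (ys.map normCode)).map (fun c => (c, ys.filter (fun sec => normCode sec == c)))

theorem keys_groupSpec (ys : List (List (String × String))) :
    (PySem.Dict.mk (groupSpec ys)).keys = PySem.Set.ofList (ys.map normCode) := by
  simp [PySem.Dict.keys, groupSpec, List.map_map, Function.comp_def]

theorem contains_groupSpec (ys : List (List (String × String))) (c : String) :
    (PySem.Dict.mk (groupSpec ys)).contains c = decide (c ∈ ys.map normCode) := by
  rw [PySem.Dict.contains_eq_decide_mem_keys, keys_groupSpec]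
  simp [PySem.Set.mem_ofList]

theorem nodup_keys_groupSpec (ys : List (List (String × String))) :
    (PySem.Dict.mk (groupSpec ys)).keys.Nodup := by
  rw [keys_groupSpec]; exact PySem.Set.nodup_ofList _

theorem filter_append_norm (ys : List (List (String × String))) (x : List (String × String)) (c : String) :
    (ys ++ [x]).filter (fun s => normCode s == c)
      = ys.filter (fun s => normCode s == c) ++ (if normCode x = c then [x] else []) := by
  rw [List.filter_append]
  by_cases hc : normCode x = c
  · simp [List.filter, hc]
  · have hb : (normCode x == c) = false := beq_eq_false_iff_ne.2 hc
    simp [List.filter, hb, hc]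

theorem getD_groupSpec (ys : List (List (String × String))) (c : String)
    (h : c ∈ ys.map normCode) :
    (PySem.Dict.mk (groupSpec ys)).getD c [] = ys.filter (fun s => normCode s == c) := by
  apply PySem.Dict.getD_of_mem_items _ _ (nodup_keys_groupSpec ys)
  show (c, _) ∈ groupSpec ys
  unfold groupSpec
  exact List.mem_map_of_mem ((PySem.Set.mem_ofList _ _).2 h)

theorem step_groupSpec (ys : List (List (String × String))) (x : List (String × String)) :
    (let code := normCode x
     let d := if (PySem.Dict.mk (groupSpec ys)).contains code then PySem.Dict.mk (groupSpec ys)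
              else (PySem.Dict.mk (groupSpec ys)).insert code []
     d.modify code [] (fun l => l ++ [x])) = PySem.Dict.mk (groupSpec (ys ++ [x])) := by
  by_cases h : normCode x ∈ ys.map normCode
  · -- the code is already a key: the loop appends x to its group
    simp only [contains_groupSpec, h, decide_true, if_true]
    rw [PySem.Dict.modify, getD_groupSpec ys _ h]
    apply PySem.Dict.ext
    rw [PySem.Dict.items_insert_of_contains _ _ (by rw [contains_groupSpec]; simpa using h)]
    show List.map _ (groupSpec ys) = groupSpec (ys ++ [x])
    unfold groupSpec
    rw [List.map_append, List.map_cons, List.map_nil,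
      PySem.Set.ofList_append_singleton,
      PySem.Set.add_of_mem (by rw [PySem.Set.mem_ofList]; exact h),
      List.map_map]
    apply List.map_congr_left
    intro c hc
    rw [PySem.Set.mem_ofList] at hc
    by_cases hcc : c = normCode x
    · subst hcc
      simp [filter_append_norm]
    · simp [Function.comp, beq_iff_eq, hcc, filter_append_norm,
        (by simpa [eq_comm] using hcc : ¬ normCode x = c)]
  · -- fresh code: A inserts an empty group then appends; the new key goes to the end
    simp only [contains_groupSpec, h, decide_false, Bool.false_eq_true, if_false]
    set d' := (PySem.Dict.mk (groupSpec ys)).insert (normCode x) [] with hd'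
    have hitems : d'.items = groupSpec ys ++ [(normCode x, [])] := by
      rw [hd', PySem.Dict.items_insert_of_not_contains]
      rw [contains_groupSpec]; simpa using h
    have hnd : d'.keys.Nodup := by
      rw [hd', PySem.Dict.keys_insert_of_not_contains _ _
        (by rw [contains_groupSpec]; simpa using h)]
      rw [keys_groupSpec]
      refine List.Nodup.append (PySem.Set.nodup_ofList _) (List.nodup_singleton _) ?_
      intro a ha hb
      rw [List.mem_singleton] at hb
      rw [PySem.Set.mem_ofList] at ha
      exact h (hb ▸ ha)
    have hget : d'.getD (normCode x) [] = [] := by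
      apply PySem.Dict.getD_of_mem_items _ _ hnd
      show (normCode x, ([] : List (List (String × String)))) ∈ d'.items
      rw [hitems]; simp
    rw [PySem.Dict.modify, hget]
    apply PySem.Dict.ext
    rw [PySem.Dict.items_insert_of_contains _ _
      (by rw [hd', PySem.Dict.contains_insert]; simp)]
    rw [hitems, List.map_append]
    show _ = groupSpec (ys ++ [x])
    unfold groupSpec
    simp only [List.map_append, List.map_cons, List.map_nil]
    rw [PySem.Set.ofList_append_singleton,
      PySem.Set.add_of_not_mem (by rw [PySem.Set.mem_ofList]; exact h),
      List.map_append]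
    refine congrArg₂ (· ++ ·) ?_ ?_
    · rw [List.map_map]
      apply List.map_congr_left
      intro c hc
      rw [PySem.Set.mem_ofList] at hc
      have hcc : ¬ c = normCode x := fun he => h (he ▸ hc)
      simp [Function.comp, beq_iff_eq, hcc, filter_append_norm,
        (by simpa [eq_comm] using hcc : ¬ normCode x = c)]
    · have hfil : ys.filter (fun s => normCode s == normCode x) = [] := by
        rw [List.filter_eq_nil_iff]
        intro a ha hba
        rw [beq_iff_eq] at hba
        exact h (hba ▸ List.mem_map_of_mem ha)
      simp [filter_append_norm, hfil]

theorem fold_eq_groupSpec (xs : List (List (String × String))) :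
    xs.foldl (fun new_list sec =>
      let code := normCode sec
      let new_list := if new_list.contains code then new_list else new_list.insert code []
      new_list.modify code [] (fun l => l ++ [sec])) PySem.Dict.empty
    = PySem.Dict.mk (groupSpec xs) := by
  induction xs using List.reverseRecOn with
  | nil => rfl
  | append_singleton ys x ih =>
      rw [List.foldl_append, ih, List.foldl_cons, List.foldl_nil]
      exact step_groupSpec ys x

-- ===== VERDICT (by name: the statement is the Claim_ definition above) =====
theorem create_course_sort_spec : Claim_equal_create_course_sort := by
  intro sec_list _ _
  unfold Spec_create_course_sort create_course_sort create_course_sort_alt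
  rw [fold_eq_groupSpec, PySem.List.dedup_eq_ofList]
  rfl
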